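-- pv_equiv track=rewrite | github.com/MasterUgwae/project-euler | 054.py | find_triplicate
-- ===== SOURCE A (Python) =====
-- from types import NoneType
--
-- def find_triplicate(lst)->str|NoneType:
--     seen = []
--     for item in lst:
--         if item in seen:
--             if seen.count(item)==2:
--                 return item
--         seen.append(item)
--     return None
-- ===== SOURCE B (Python) =====
-- def find_triplicate(lst):
--     # Pass 1: count occurrences, recording the index at which each value
--     # reaches its third occurrence (never overwritten).
--     counts = {}
--     third_pos = {}
--     for i, item in enumerate(lst):
--         counts[item] = counts.get(item, 0) + 1
--         if counts[item] == 3 and item not in third_pos: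
--             third_pos[item] = i
--     # Pass 2: the answer is the value whose third occurrence comes earliest.
--     if not third_pos:
--         return None
--     return min(third_pos, key=third_pos.get)
-- ===== Notes on version B (the rewrite author's own statement) =====
-- stated objective: alternative
-- what changed: Replaces A's early-returning scan that re-searches and re-counts the growing `seen` list by two separate passes: a dict-counting pass that records each value's third-occurrence index, then a min-by-recorded-index reduction.
import Mathlib
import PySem

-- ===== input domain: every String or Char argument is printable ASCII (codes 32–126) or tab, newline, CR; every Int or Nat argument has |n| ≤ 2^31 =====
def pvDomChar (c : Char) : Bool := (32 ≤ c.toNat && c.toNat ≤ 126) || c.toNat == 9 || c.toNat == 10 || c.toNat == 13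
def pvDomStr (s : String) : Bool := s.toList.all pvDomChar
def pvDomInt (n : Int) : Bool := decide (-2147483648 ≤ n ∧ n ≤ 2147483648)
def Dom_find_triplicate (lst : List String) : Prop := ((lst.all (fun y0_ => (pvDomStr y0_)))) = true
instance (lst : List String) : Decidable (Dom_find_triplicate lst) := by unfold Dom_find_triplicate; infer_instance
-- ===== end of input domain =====

-- B replaces A's early-returning scan of the growing `seen` list by a counting pass
-- recording each value's third-occurrence index, plus a min-by-index reduction.

-- ===== PORT A =====
def findTriplicateGo (seen : List String) (rest : List String) : Option String :=
  match rest with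
  | [] => none
  | item :: xs =>
    if seen.contains item then
      if seen.count item == 2 then some item
      else findTriplicateGo (seen ++ [item]) xs
    else findTriplicateGo (seen ++ [item]) xs

def find_triplicate (lst : List String) : Option String :=
  findTriplicateGo [] lst

-- ===== PORT B =====
-- first pass of Source B: counts/third_pos dicts over enumerate(lst); returns third_pos
def tripLoop (counts : PySem.Dict String Int) (third : PySem.Dict String Int)
    (i : Int) (rest : List String) : PySem.Dict String Int :=
  match rest with
  | [] => third
  | item :: xs =>
    let counts' := counts.modify item 0 (· + 1)
    let third' :=
      if counts'.getD item 0 == 3 && !third.contains item then third.insert item i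
      else third
    tripLoop counts' third' (i + 1) xs

def find_triplicate_alt (lst : List String) : Option String :=
  let third := tripLoop PySem.Dict.empty PySem.Dict.empty 0 lst
  if third.items.isEmpty then none
  else PySem.List.min? third.keys (fun k => third.getD k 0)

-- ===== PRECONDITION & SPEC =====
def Spec_find_triplicate (lst : List String) (out : Option String) : Prop := out = find_triplicate_alt lst
instance (lst : List String) (out : Option String) : Decidable (Spec_find_triplicate lst out) := by unfold Spec_find_triplicate; infer_instance

-- ===== CLAIM (what is proved, stated in full; the proofs are below) =====
def Claim_equal_find_triplicate : Prop := ∀ (lst : List String), Dom_find_triplicate lst → Spec_find_triplicate lst (find_triplicate lst)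

-- ===== LEMMAS AND PROOFS =====

-- a key of a literal dict is paired (somewhere in the items) with its getD value
theorem getD_pair_mem (l : List (String × Int)) (m : String)
    (hm : m ∈ l.map Prod.fst) : (m, (PySem.Dict.mk l).getD m 0) ∈ l := by
  induction l with
  | nil => simp at hm
  | cons p t ih =>
    obtain ⟨a, b⟩ := p
    rw [PySem.Dict.getD_eq_get?_getD, PySem.Dict.get?_mk_cons]
    by_cases hab : a = m
    · subst hab; simp
    · simp only [List.map_cons, List.mem_cons] at hm
      rcases hm with h | h
      · exact absurd h.symm hab
      · have := ih h
        rw [PySem.Dict.getD_eq_get?_getD] at this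
        simp [beq_iff_eq, hab, this]

-- min-by-value over a dict whose items carry strictly increasing values is the first key
theorem min?_head (k : String) (v : Int) (rest : List (String × Int))
    (hp : List.Pairwise (fun a b : String × Int => a.2 < b.2) ((k, v) :: rest)) :
    PySem.List.min? (PySem.Dict.mk ((k, v) :: rest)).keys
      (fun k' => (PySem.Dict.mk ((k, v) :: rest)).getD k' 0) = some k := by
  set d := PySem.Dict.mk ((k, v) :: rest) with hd
  have hkeys : d.keys = k :: rest.map Prod.fst := by simp [hd, PySem.Dict.keys]
  cases hmin : PySem.List.min? d.keys (fun k' => d.getD k' 0) with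
  | none =>
    rw [PySem.List.min?_eq_none_iff] at hmin
    rw [hkeys] at hmin; cases hmin
  | some m =>
    have hmem := PySem.List.min?_mem hmin
    have hdk : d.getD k 0 = v := by
      rw [hd, PySem.Dict.getD_eq_get?_getD, PySem.Dict.get?_mk_cons]; simp
    by_cases hmk : m = k
    · rw [hmk]
    · -- m is a later key: its value exceeds v, contradicting minimality
      have hmem' : m ∈ ((k, v) :: rest).map Prod.fst := by
        simp only [List.map_cons]; rw [← hkeys]; exact hmem
      have hpair := getD_pair_mem ((k, v) :: rest) m hmem'
      rw [← hd] at hpair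
      have hpair' : (m, d.getD m 0) ∈ rest := by
        rcases List.mem_cons.mp hpair with h | h
        · exact absurd (congrArg Prod.fst h) hmk
        · exact h
      have hgt : v < d.getD m 0 := by
        have := (List.pairwise_cons.mp hp).1 (m, d.getD m 0) hpair'
        simpa using this
      have hle : d.getD m 0 ≤ d.getD k 0 := by
        have := PySem.List.min?_isMin hmin k (by rw [hkeys]; simp)
        simpa using this
      rw [hdk] at hle; omega

-- the B loop, started on a non-empty strictly-increasing third_pos with all recorded
-- indices below i, keeps the head, keeps values strictly increasing, stays non-empty
theorem tripLoop_inv (xs : List String) :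
    ∀ (counts third : PySem.Dict String Int) (i : Int),
    third.items ≠ [] → (∀ p ∈ third.items, p.2 < i) →
    third.items.Pairwise (fun a b => a.2 < b.2) →
    (tripLoop counts third i xs).items.head? = third.items.head? ∧
    (tripLoop counts third i xs).items.Pairwise (fun a b => a.2 < b.2) ∧
    (tripLoop counts third i xs).items ≠ [] := by
  induction xs with
  | nil => intro counts third i h1 h2 h3; exact ⟨rfl, h3, h1⟩
  | cons item xs ih =>
    intro counts third i h1 h2 h3
    simp only [tripLoop]
    by_cases hg : ((counts.modify item 0 (· + 1)).getD item 0 == 3 && !third.contains item) = true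
    · rw [if_pos hg]
      have hg' := hg
      rw [Bool.and_eq_true] at hg'
      have hnc : third.contains item = false := by simpa using hg'.2
      have hitems : (third.insert item i).items = third.items ++ [(item, i)] :=
        PySem.Dict.items_insert_of_not_contains _ _ hnc
      have h1' : (third.insert item i).items ≠ [] := by
        rw [hitems]; simp
      have h2' : ∀ p ∈ (third.insert item i).items, p.2 < i + 1 := by
        intro p hp; rw [hitems] at hp
        rcases List.mem_append.mp hp with h | h
        · exact lt_trans (h2 p h) (by omega)
        · simp at h; subst h; omega
      have h3' : (third.insert item i).items.Pairwise (fun a b => a.2 < b.2) := by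
        rw [hitems]
        refine List.pairwise_append.mpr ⟨h3, by simp, ?_⟩
        intro a ha b hb; simp at hb; subst hb; exact h2 a ha
      obtain ⟨hh, hpw, hne⟩ := ih _ _ _ h1' h2' h3'
      refine ⟨?_, hpw, hne⟩
      rw [hh, hitems]
      cases hc : third.items with
      | nil => exact absurd hc h1
      | cons a t => simp
    · rw [if_neg hg]
      exact ih _ _ _ h1 (fun p hp => lt_trans (h2 p hp) (by omega)) h3

-- the second pass of Source B as a named reduction (used to state the loop invariant)
def pvReduce (d : PySem.Dict String Int) : Option String :=
  if d.items.isEmpty then none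
  else PySem.List.min? d.keys (fun k => d.getD k 0)

-- main invariant: A's loop from prefix `seen` (no value seen thrice yet) equals
-- B's count-then-reduce run over the remaining items
theorem main_inv (xs : List String) :
    ∀ (seen : List String), (∀ x, seen.count x ≤ 2) →
    findTriplicateGo seen xs =
      pvReduce (tripLoop (PySem.Dict.counter seen) PySem.Dict.empty (seen.length : Int) xs) := by
  induction xs with
  | nil => intro seen _; simp [findTriplicateGo, tripLoop, pvReduce, PySem.Dict.empty]
  | cons item xs ih =>
    intro seen hcnt
    simp only [findTriplicateGo, tripLoop]
    have hc : (PySem.Dict.counter seen).modify item 0 (· + 1) = PySem.Dict.counter (seen ++ [item]) :=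
      (PySem.Dict.counter_append_singleton seen item).symm
    have hgetD : ((PySem.Dict.counter seen).modify item 0 (· + 1)).getD item 0 = (seen.count item : Int) + 1 := by
      rw [PySem.Dict.getD_modify_self, PySem.Dict.getD_counter]
    by_cases h2 : seen.count item = 2
    · -- third occurrence: A returns item; B records it and the reduction yields it
      have hmem : seen.contains item = true := by
        simp only [List.contains_iff_mem]
        exact List.count_pos_iff.mp (by omega)
      rw [if_pos hmem, if_pos (show (seen.count item == 2) = true by simp [h2])]
      have hguard : (((PySem.Dict.counter seen).modify item 0 (· + 1)).getD item 0 == 3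
          && !(PySem.Dict.empty : PySem.Dict String Int).contains item) = true := by
        rw [hgetD, h2]; simp [PySem.Dict.contains_empty]
      rw [if_pos hguard]
      have hitems : ((PySem.Dict.empty : PySem.Dict String Int).insert item (seen.length : Int)).items
          = [(item, (seen.length : Int))] := by
        rw [PySem.Dict.items_insert_of_not_contains _ _ (PySem.Dict.contains_empty _)]
        simp [PySem.Dict.empty]
      obtain ⟨hh, hpw, hne⟩ := tripLoop_inv xs ((PySem.Dict.counter seen).modify item 0 (· + 1))
        ((PySem.Dict.empty : PySem.Dict String Int).insert item (seen.length : Int))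
        ((seen.length : Int) + 1)
        (by rw [hitems]; simp)
        (by
          intro p hp; rw [hitems] at hp
          simp only [List.mem_singleton] at hp
          subst hp
          show ((seen.length : Int)) < (seen.length : Int) + 1
          omega)
        (by rw [hitems]; simp)
      rw [hitems] at hh
      set tfin := tripLoop ((PySem.Dict.counter seen).modify item 0 (· + 1))
        ((PySem.Dict.empty : PySem.Dict String Int).insert item (seen.length : Int))
        ((seen.length : Int) + 1) xs with htf
      cases hfi : tfin.items with
      | nil => exact absurd hfi hne
      | cons p rest =>
        obtain ⟨a, b⟩ := p
        rw [hfi] at hh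
        simp only [List.head?_cons, Option.some.injEq, Prod.mk.injEq] at hh
        obtain ⟨ha, hb⟩ := hh
        rw [ha, hb] at hfi
        rw [hfi] at hpw
        have hteq : tfin = PySem.Dict.mk ((item, (seen.length : Int)) :: rest) := PySem.Dict.ext hfi
        rw [hteq]
        refine Eq.symm ?_
        simp only [pvReduce, List.isEmpty_cons, Bool.false_eq_true, if_false]
        exact min?_head item (seen.length : Int) rest hpw
    · -- not a third occurrence: third_pos stays empty and both sides continue on seen ++ [item]
      have hguard : (((PySem.Dict.counter seen).modify item 0 (· + 1)).getD item 0 == 3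
          && !(PySem.Dict.empty : PySem.Dict String Int).contains item) = false := by
        rw [hgetD]
        have h3 : ((seen.count item : Int) + 1 == 3) = false := by
          simp only [beq_eq_false_iff_ne, ne_eq]; omega
        rw [h3]; simp
      have hcnt' : ∀ x, (seen ++ [item]).count x ≤ 2 := by
        intro x
        rw [List.count_append]
        by_cases hx : x = item
        · subst hx
          have hone : List.count x [x] = 1 := by simp
          have := hcnt x
          omega
        · have hzero : List.count x [item] = 0 := by simp [List.count_eq_zero, hx]
          have := hcnt x
          omega
      have hrec := ih (seen ++ [item]) hcnt'
      rw [show (((seen ++ [item]).length : Nat) : Int) = (seen.length : Int) + 1 by simp] at hrec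
      rw [if_neg (show ¬((((PySem.Dict.counter seen).modify item 0 (· + 1)).getD item 0 == 3
          && !(PySem.Dict.empty : PySem.Dict String Int).contains item) = true) from by
        rw [hguard]; simp)]
      rw [hc, ← hrec]
      by_cases hmem : seen.contains item = true
      · rw [if_pos hmem, if_neg (show ¬((seen.count item == 2) = true) from by simp [h2])]
      · rw [if_neg hmem]

-- ===== VERDICT (by name: the statement is the Claim_ definition above) =====
theorem find_triplicate_spec : Claim_equal_find_triplicate := by
  intro lst _
  show find_triplicate lst = find_triplicate_alt lst
  have h := main_inv lst [] (by intro x; simp)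
  simpa [find_triplicate, find_triplicate_alt, pvReduce, PySem.Dict.counter] using h
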